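-- pv_equiv track=rewrite | github.com/gvbarker/CHOMP | src/chomp.py | __removeQuotedMaterial
-- ===== SOURCE A (Python) =====
-- def __removeQuotedMaterial(line):
--     flag = False
--     newstr = ''
--     for char in line:
--         if (not flag and not char == '\"'):
--             newstr += char
--         if(char=='\"'):
--             flag = not flag
--     return newstr
-- ===== SOURCE B (Python) =====
-- def __removeQuotedMaterial(line):
--     # Segment-based: peel off text before the next '"', skip the quoted
--     # section up to the matching '"', and recurse on the remainder.
--     before, sep, rest = line.partition('"')
--     if not sep:
--         return before
--     _, sep2, after = rest.partition('"')
--     if not sep2: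
--         return before
--     return before + __removeQuotedMaterial(after)
-- ===== Notes on version B (the rewrite author's own statement) =====
-- stated objective: faster
-- what changed: Replaces the character-by-character boolean-flag scan that builds the result by repeated string += with a recursive segment decomposition: partition off the text before the next quote, skip the quoted section up to its closing quote, recurse on the remainder, and join the kept segments.
import Mathlib
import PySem

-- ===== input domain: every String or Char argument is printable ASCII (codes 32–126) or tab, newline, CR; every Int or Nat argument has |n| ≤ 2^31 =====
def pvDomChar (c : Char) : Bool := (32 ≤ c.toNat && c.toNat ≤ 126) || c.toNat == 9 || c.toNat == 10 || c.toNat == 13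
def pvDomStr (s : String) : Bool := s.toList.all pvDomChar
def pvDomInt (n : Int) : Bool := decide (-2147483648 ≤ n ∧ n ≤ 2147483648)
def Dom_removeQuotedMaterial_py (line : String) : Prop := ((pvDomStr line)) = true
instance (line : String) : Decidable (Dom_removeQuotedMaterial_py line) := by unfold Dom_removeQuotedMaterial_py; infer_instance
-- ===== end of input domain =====

-- B replaces A's boolean-flag character scan by a recursive segment decomposition
-- (partition before the next quote, skip to the closing quote, recurse); objective: simpler.

-- ===== PORT A =====
-- The for-loop as structural recursion over the same state (flag, newstr), both ifs in order.
def aLoop (cs : List Char) (flag : Bool) (newstr : List Char) : List Char :=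
  match cs with
  | [] => newstr
  | char :: rest =>
    let newstr1 := if (!flag) && !(char == '"') then newstr ++ [char] else newstr
    let flag1 := if char == '"' then !flag else flag
    aLoop rest flag1 newstr1

def removeQuotedMaterial_py (line : String) : String :=
  String.ofList (aLoop line.toList false [])

-- ===== PORT B =====
-- Source B uses str.partition('"'): (takeWhile (≠ '"'), dropWhile (≠ '"')) is exactly
-- (the part before the first '"', the rest starting at it); empty sep ↔ dropWhile = [].
def altGo (cs : List Char) : List Char :=
  let before := cs.takeWhile (fun c => c ≠ '"')
  match h : cs.dropWhile (fun c => c ≠ '"') with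
  | [] => before
  | _ :: r =>
    match h2 : r.dropWhile (fun c => c ≠ '"') with
    | [] => before
    | _ :: r2 => before ++ altGo r2
termination_by cs.length
decreasing_by
  have h1 : (cs.dropWhile (fun c => c ≠ '"')).length ≤ cs.length := List.length_dropWhile_le _ _
  have h3 : (r.dropWhile (fun c => c ≠ '"')).length ≤ r.length := List.length_dropWhile_le _ _
  rw [h] at h1; rw [h2] at h3; simp at h1 h3; omega

def removeQuotedMaterial_py_alt (line : String) : String :=
  String.ofList (altGo line.toList)

-- ===== PRECONDITION & SPEC =====
def Spec_removeQuotedMaterial_py (line : String) (out : String) : Prop := out = removeQuotedMaterial_py_alt line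
instance (line : String) (out : String) : Decidable (Spec_removeQuotedMaterial_py line out) := by unfold Spec_removeQuotedMaterial_py; infer_instance

-- ===== CLAIM (what is proved, stated in full; the proofs are below) =====
def Claim_equal_removeQuotedMaterial_py : Prop := ∀ (line : String), Dom_removeQuotedMaterial_py line → Spec_removeQuotedMaterial_py line (removeQuotedMaterial_py line)

-- ===== LEMMAS AND PROOFS =====

-- A one-step unfolding of A's loop (definitional).
theorem aLoop_cons (c : Char) (rest : List Char) (flag : Bool) (acc : List Char) :
    aLoop (c :: rest) flag acc =
      aLoop rest (if c == '"' then !flag else flag)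
        (if (!flag) && !(c == '"') then acc ++ [c] else acc) := rfl

-- A's loop with the accumulator factored out.
theorem aLoop_acc (cs : List Char) (flag : Bool) (acc : List Char) :
    aLoop cs flag acc = acc ++ aLoop cs flag [] := by
  induction cs generalizing flag acc with
  | nil => simp [aLoop]
  | cons c rest ih =>
    rw [aLoop_cons, aLoop_cons]
    by_cases hcond : ((!flag) && !(c == '"')) = true
    · simp only [hcond, if_true]
      rw [ih, ih _ ([] ++ [c])]
      simp
    · simp only [Bool.not_eq_true] at hcond
      simp only [hcond, Bool.false_eq_true, if_false]
      exact ih _ _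

-- Outside a quote, over quote-free text, A's loop copies the text.
theorem aLoop_no_quote (cs : List Char) (h : ∀ c ∈ cs, c ≠ '"') :
    aLoop cs false [] = cs := by
  induction cs with
  | nil => simp [aLoop]
  | cons c rest ih =>
    have hc : c ≠ '"' := h c (by simp)
    rw [aLoop_cons]
    rw [if_neg (by simp [hc]), if_pos (by simp [hc]), aLoop_acc]
    simp only [List.nil_append, List.singleton_append]
    rw [ih (fun x hx => h x (by simp [hx]))]

-- Crossing a quote-free prefix followed by an opening quote.
theorem aLoop_prefix_quote (pre r : List Char) (h : ∀ c ∈ pre, c ≠ '"') :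
    aLoop (pre ++ '"' :: r) false [] = pre ++ aLoop r true [] := by
  induction pre with
  | nil =>
    rw [List.nil_append, aLoop_cons]
    simp
  | cons c rest ih =>
    have hc : c ≠ '"' := h c (by simp)
    rw [List.cons_append, aLoop_cons]
    rw [if_neg (by simp [hc]), if_pos (by simp [hc]), aLoop_acc]
    simp only [List.nil_append, List.singleton_append, List.cons_append]
    rw [ih (fun x hx => h x (by simp [hx]))]

-- Inside a quote: skip to the closing quote, then continue outside.
theorem aLoop_true (cs : List Char) :
    aLoop cs true [] =
      (match cs.dropWhile (fun c => c ≠ '"') with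
       | [] => []
       | _ :: r => aLoop r false []) := by
  induction cs with
  | nil => simp [aLoop]
  | cons c rest ih =>
    rw [aLoop_cons]
    by_cases hc : c = '"'
    · rw [if_pos (by simp [hc]), if_neg (by simp)]
      simp [List.dropWhile_cons, hc]
    · rw [if_neg (by simp [hc]), if_neg (by simp)]
      simp only [List.dropWhile_cons, hc, decide_not]
      rw [ih]
      simp [hc]

-- Case equations for altGo.
theorem altGo_eq_nil (cs : List Char)
    (h : List.dropWhile (fun c => decide (c ≠ '"')) cs = []) :
    altGo cs = cs.takeWhile (fun c => decide (c ≠ '"')) := by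
  rw [altGo]
  split
  · rfl
  · rename_i x r heq
    rw [heq] at h; cases h

theorem altGo_eq_one (cs : List Char) (q : Char) (r : List Char)
    (h : List.dropWhile (fun c => decide (c ≠ '"')) cs = q :: r)
    (h2 : List.dropWhile (fun c => decide (c ≠ '"')) r = []) :
    altGo cs = cs.takeWhile (fun c => decide (c ≠ '"')) := by
  rw [altGo]
  split
  · rfl
  · rename_i x r' heq
    rw [heq] at h
    cases h
    split
    · rfl
    · rename_i y r2 heq2
      rw [heq2] at h2; cases h2

theorem altGo_eq_two (cs : List Char) (q : Char) (r : List Char) (y : Char) (r2 : List Char)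
    (h : List.dropWhile (fun c => decide (c ≠ '"')) cs = q :: r)
    (h2 : List.dropWhile (fun c => decide (c ≠ '"')) r = y :: r2) :
    altGo cs = cs.takeWhile (fun c => decide (c ≠ '"')) ++ altGo r2 := by
  rw [altGo]
  split
  · rename_i heq
    rw [heq] at h; cases h
  · rename_i x r' heq
    rw [heq] at h
    cases h
    split
    · rename_i heq2
      rw [heq2] at h2; cases h2
    · rename_i y' r2' heq2
      rw [heq2] at h2
      cases h2
      rfl

-- The quote-free prefix and the opening quote, extracted from a dropWhile equation.
theorem head_of_dropWhile_cons (cs : List Char) (q : Char) (r : List Char)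
    (h : List.dropWhile (fun c => decide (c ≠ '"')) cs = q :: r) : q = '"' := by
  have hw : cs.dropWhile (fun c => decide (c ≠ '"')) ≠ [] := by rw [h]; simp
  have := List.head_dropWhile_not (fun c => decide (c ≠ '"')) hw
  simp only [h, List.head_cons] at this
  simpa using this

theorem split_of_dropWhile_cons (cs : List Char) (q : Char) (r : List Char)
    (h : List.dropWhile (fun c => decide (c ≠ '"')) cs = q :: r) :
    cs = cs.takeWhile (fun c => decide (c ≠ '"')) ++ '"' :: r := by
  have hq := head_of_dropWhile_cons cs q r h
  have := List.takeWhile_append_dropWhile (p := fun c => decide (c ≠ '"')) (l := cs)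
  rw [h, hq] at this
  exact this.symm

theorem takeWhile_no_quote (cs : List Char) :
    ∀ c ∈ cs.takeWhile (fun c => decide (c ≠ '"')), c ≠ '"' := by
  intro c hc; simpa using List.mem_takeWhile_imp hc

theorem aLoop_eq_altGo (cs : List Char) : aLoop cs false [] = altGo cs := by
  induction cs using altGo.induct with
  | case1 cs h =>
    rw [altGo_eq_nil cs h]
    have htw : cs.takeWhile (fun c => decide (c ≠ '"')) = cs := by
      have := List.takeWhile_append_dropWhile (p := fun c => decide (c ≠ '"')) (l := cs)
      rw [h, List.append_nil] at this; exact this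
    rw [htw]
    refine aLoop_no_quote cs ?_
    intro c hc
    rw [← htw] at hc
    exact takeWhile_no_quote cs c hc
  | case2 cs q r h h2 =>
    rw [altGo_eq_one cs q r h h2]
    conv_lhs => rw [split_of_dropWhile_cons cs q r h]
    rw [aLoop_prefix_quote _ _ (takeWhile_no_quote cs), aLoop_true, h2]
    simp
  | case3 cs q r h y r2 h2 ih =>
    rw [altGo_eq_two cs q r y r2 h h2]
    conv_lhs => rw [split_of_dropWhile_cons cs q r h]
    rw [aLoop_prefix_quote _ _ (takeWhile_no_quote cs), aLoop_true, h2]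
    simpa using ih

-- ===== VERDICT (by name: the statement is the Claim_ definition above) =====
theorem removeQuotedMaterial_py_spec : Claim_equal_removeQuotedMaterial_py := by
  intro line _
  unfold Spec_removeQuotedMaterial_py removeQuotedMaterial_py removeQuotedMaterial_py_alt
  rw [aLoop_eq_altGo]
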